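-- pv_equiv track=rewrite | github.com/gauravaccentureproducts/jlpt-n5-tutor | tools/rebalance_round2_2026_05_04.py | compute_balanced_targets
-- ===== SOURCE A (Python) =====
-- def compute_balanced_targets(items, constrained_ids: set, totals: list[int]):
--     """Compute per-Q target_correctIndex to land at totals (e.g.
--     [25,25,25,25]). Items in `constrained_ids` keep their current index.
--     Returns dict {kbSourceId: target_idx} for items needing a swap."""
--     constrained_dist = [0, 0, 0, 0]
--     unconstrained = []
--     for kbid, cur in items:
--         if kbid in constrained_ids:
--             constrained_dist[cur] += 1
--         else:
--             unconstrained.append((kbid, cur))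
--
--     target_uncon = [totals[i] - constrained_dist[i] for i in range(4)]
--     cur_uncon = [0, 0, 0, 0]
--     by_pos = {0: [], 1: [], 2: [], 3: []}
--     for kbid, cur in unconstrained:
--         cur_uncon[cur] += 1
--         by_pos[cur].append(kbid)
--
--     deltas = [target_uncon[i] - cur_uncon[i] for i in range(4)]
--
--     surplus = [[i, -deltas[i]] for i in range(4) if deltas[i] < 0]
--     deficit = [[i, deltas[i]] for i in range(4) if deltas[i] > 0]
--     deficit.sort(key=lambda d: cur_uncon[d[0]])  # fill lowest-count first
--
--     moves = {}
--     for src_pos, src_count in surplus: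
--         for kbid in by_pos[src_pos][:src_count]:
--             for slot in deficit:
--                 if slot[1] > 0:
--                     moves[kbid] = slot[0]
--                     slot[1] -= 1
--                     break
--     return moves
-- ===== SOURCE B (Python) =====
-- def _target_for(bounds, rank):
--     """First deficit position whose cumulative capacity exceeds rank."""
--     for end, pos in bounds:
--         if rank < end:
--             return pos
--     raise ValueError("no deficit capacity left")  # unreachable: caller checks rank < acc
--
--
-- def compute_balanced_targets(items, constrained_ids: set, totals: list[int]):
--     """Same result as A, but without bucketing ids or consuming mutable slot
--     counters: count distributions in one pass, turn the deficits into cumulative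
--     capacity boundaries (prefix sums), then re-scan items per surplus position,
--     giving each moved item a running global rank that is mapped to its target
--     position through the boundaries."""
--     cons = [0, 0, 0, 0]
--     cnt = [0, 0, 0, 0]
--     for kbid, cur in items:
--         if kbid in constrained_ids:
--             cons[cur] += 1
--         else:
--             cnt[cur] += 1
--
--     deltas = [totals[i] - cons[i] - cnt[i] for i in range(4)]
--
--     # cumulative capacity boundaries of deficit positions, lowest current count first
--     bounds = []
--     acc = 0
--     for i in sorted((i for i in range(4) if deltas[i] > 0), key=lambda i: cnt[i]):
--         acc += deltas[i]
--         bounds.append((acc, i))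
--
--     moves = {}
--     rank = 0
--     for p in range(4):
--         if deltas[p] >= 0:
--             continue
--         remaining = -deltas[p]
--         for kbid, cur in items:
--             if remaining == 0:
--                 break
--             if cur == p and kbid not in constrained_ids:
--                 remaining -= 1
--                 if rank < acc:
--                     moves[kbid] = _target_for(bounds, rank)
--                     rank += 1
--     return moves
-- ===== Notes on version B (the rewrite author's own statement) =====
-- stated objective: alternative
-- what changed: A buckets unconstrained ids into a dict of per-position lists and runs a triple-nested greedy loop that decrements mutable deficit slot counters; B never materializes buckets or slot queues: it only counts distributions, turns the sorted deficits into cumulative capacity boundaries (prefix sums), then re-scans the items per surplus position, assigning each moved item a running global rank that a boundary lookup maps to its target position.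
import Mathlib
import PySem

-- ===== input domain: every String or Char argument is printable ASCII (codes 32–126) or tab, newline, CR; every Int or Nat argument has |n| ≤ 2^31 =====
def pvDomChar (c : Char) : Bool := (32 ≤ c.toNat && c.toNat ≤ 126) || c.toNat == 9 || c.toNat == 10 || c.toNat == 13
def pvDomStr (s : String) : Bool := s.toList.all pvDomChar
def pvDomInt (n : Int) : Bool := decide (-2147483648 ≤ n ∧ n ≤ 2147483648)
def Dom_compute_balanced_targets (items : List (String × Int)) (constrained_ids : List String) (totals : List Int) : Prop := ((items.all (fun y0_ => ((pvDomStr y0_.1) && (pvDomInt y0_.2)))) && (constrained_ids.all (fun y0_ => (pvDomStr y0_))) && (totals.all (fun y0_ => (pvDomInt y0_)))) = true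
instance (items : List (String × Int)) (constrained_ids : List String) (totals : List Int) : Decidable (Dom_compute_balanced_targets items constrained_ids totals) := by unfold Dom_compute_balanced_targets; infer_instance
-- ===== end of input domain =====

-- B drops A's id buckets and mutable deficit slot counters: it counts, turns the sorted
-- deficits into cumulative capacity boundaries, and maps each moved item's running global
-- rank to its target through those boundaries (objective: alternative decomposition).

-- ===== PORT A =====

-- 'l[i] += 1' with Python index semantics (negative index from the end; out of range =
-- IndexError in Python, excluded by Pre_; the 'none' branch is then unreachable).
def pvBump (l : List Int) (i : Int) : List Int :=
  match PySem.List.pyIdx? l.length i with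
  | some j => l.set j (l.getD j 0 + 1)
  | none => l

-- the literal dict {0: [], 1: [], 2: [], 3: []}
def pvInitByPos : PySem.Dict Int (List String) :=
  (((PySem.Dict.empty.insert 0 []).insert 1 []).insert 2 []).insert 3 []

-- 'for slot in deficit: if slot[1] > 0: ...; slot[1] -= 1; break' — returns the chosen
-- position and the deficit list with that slot decremented (mutation becomes rebuilding).
def pvInnerA : List (Int × Int) → Option (Int × List (Int × Int))
  | [] => none
  | (p, c) :: t =>
    if 0 < c then some (p, (p, c - 1) :: t)
    else match pvInnerA t with
      | some (q, t') => some (q, (p, c) :: t')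
      | none => none

def pvAssignA (st : PySem.Dict String Int × List (Int × Int)) (kbid : String) :
    PySem.Dict String Int × List (Int × Int) :=
  match pvInnerA st.2 with
  | some (q, d') => (st.1.insert kbid q, d')
  | none => st

def compute_balanced_targets (items : List (String × Int)) (constrained_ids : List String) (totals : List Int) : List (String × Int) :=
  -- first loop: constrained_dist and unconstrained accumulated together
  let step1 := items.foldl (fun s p =>
      if constrained_ids.contains p.1 then (pvBump s.1 p.2, s.2) else (s.1, s.2 ++ [p]))
      (([0, 0, 0, 0] : List Int), ([] : List (String × Int)))
  let constrained_dist := step1.1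
  let unconstrained := step1.2
  -- totals[i] raises IndexError when len(totals) < 4 (excluded by Pre_); pyGetD is exact inside Pre_
  let target_uncon := (PySem.List.pyRange 0 4 1).map (fun i =>
      PySem.List.pyGetD totals i 0 - PySem.List.pyGetD constrained_dist i 0)
  -- second loop: cur_uncon and by_pos accumulated together; by_pos[cur] with cur ∉ {0,1,2,3}
  -- is a KeyError in Python (excluded by Pre_), so Dict.modify is exact inside Pre_
  let step2 := unconstrained.foldl (fun s p =>
      (pvBump s.1 p.2, s.2.modify p.2 [] (fun l => l ++ [p.1])))
      (([0, 0, 0, 0] : List Int), pvInitByPos)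
  let cur_uncon := step2.1
  let by_pos := step2.2
  let deltas := (PySem.List.pyRange 0 4 1).map (fun i =>
      PySem.List.pyGetD target_uncon i 0 - PySem.List.pyGetD cur_uncon i 0)
  let surplus := ((PySem.List.pyRange 0 4 1).filter
      (fun i => decide (PySem.List.pyGetD deltas i 0 < 0))).map
      (fun i => (i, -PySem.List.pyGetD deltas i 0))
  let deficit := PySem.List.sorted
      (((PySem.List.pyRange 0 4 1).filter
        (fun i => decide (0 < PySem.List.pyGetD deltas i 0))).map
        (fun i => (i, PySem.List.pyGetD deltas i 0)))
      (fun d => PySem.List.pyGetD cur_uncon d.1 0)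
  -- moves loop; by_pos[src_pos] always has its key (src_pos ∈ {0,1,2,3}), so getD is exact
  let res := surplus.foldl (fun st sp =>
      (PySem.List.slice (by_pos.getD sp.1 []) none (some sp.2)).foldl pvAssignA st)
      (PySem.Dict.empty, deficit)
  res.1.items

-- ===== PORT B =====

-- '_target_for(bounds, rank)': first pos whose cumulative capacity end exceeds rank;
-- Python raises ValueError when none does (none here; unreachable under the rank < acc guard)
def pvTargetFor : List (Int × Int) → Int → Option Int
  | [], _ => none
  | (e, p) :: t, r => if r < e then some p else pvTargetFor t r

-- B's inner 'for kbid, cur in items' loop for one surplus position p: carries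
-- (remaining, rank, moves); 'break' when remaining hits 0; returns (moves, rank)
def pvScanB (cids : List String) (bounds : List (Int × Int)) (acc p : Int) :
    List (String × Int) → Int → Int → PySem.Dict String Int → PySem.Dict String Int × Int
  | [], _, rank, m => (m, rank)
  | it :: t, remaining, rank, m =>
    if remaining == 0 then (m, rank)
    else if it.2 == p && !(cids.contains it.1) then
      if rank < acc then
        match pvTargetFor bounds rank with
        | some q => pvScanB cids bounds acc p t (remaining - 1) (rank + 1) (m.insert it.1 q)
        | none => pvScanB cids bounds acc p t (remaining - 1) rank m -- Python raises; unreachable: rank < acc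
      else pvScanB cids bounds acc p t (remaining - 1) rank m
    else pvScanB cids bounds acc p t remaining rank m

def compute_balanced_targets_alt (items : List (String × Int)) (constrained_ids : List String) (totals : List Int) : List (String × Int) :=
  -- one counting pass: cons and cnt together
  let step1 := items.foldl (fun s p =>
      if constrained_ids.contains p.1 then (pvBump s.1 p.2, s.2) else (s.1, pvBump s.2 p.2))
      (([0, 0, 0, 0] : List Int), ([0, 0, 0, 0] : List Int))
  let cons := step1.1
  let cnt := step1.2
  let deltas := (PySem.List.pyRange 0 4 1).map (fun i =>
      PySem.List.pyGetD totals i 0 - PySem.List.pyGetD cons i 0 - PySem.List.pyGetD cnt i 0)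
  -- cumulative capacity boundaries of deficit positions, lowest current count first
  let order := PySem.List.sorted
      ((PySem.List.pyRange 0 4 1).filter (fun i => decide (0 < PySem.List.pyGetD deltas i 0)))
      (fun i => PySem.List.pyGetD cnt i 0)
  let bstep := order.foldl (fun s i =>
      (s.1 + PySem.List.pyGetD deltas i 0, s.2 ++ [(s.1 + PySem.List.pyGetD deltas i 0, i)]))
      ((0 : Int), ([] : List (Int × Int)))
  let acc := bstep.1
  let bounds := bstep.2
  -- per surplus position, re-scan items; global rank threaded through the positions
  let res := ((PySem.List.pyRange 0 4 1).filter
      (fun p => decide (PySem.List.pyGetD deltas p 0 < 0))).foldl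
      (fun st p => pvScanB constrained_ids bounds acc p items (-PySem.List.pyGetD deltas p 0) st.2 st.1)
      (PySem.Dict.empty, (0 : Int))
  res.1.items

-- ===== PRECONDITION & SPEC =====
-- Pre_ is exactly where A returns: len(totals) ≥ 4 (else totals[i] raises IndexError) and every
-- item position is 0..3 — except that a CONSTRAINED item may also carry -4..-1, where Python's
-- negative indexing into constrained_dist makes A return normally.
def Pre_compute_balanced_targets (items : List (String × Int)) (constrained_ids : List String) (totals : List Int) : Prop :=
  4 ≤ totals.length ∧
    ∀ p ∈ items, (0 ≤ p.2 ∧ p.2 < 4) ∨ (p.1 ∈ constrained_ids ∧ -4 ≤ p.2 ∧ p.2 < 0)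
instance (items : List (String × Int)) (constrained_ids : List String) (totals : List Int) : Decidable (Pre_compute_balanced_targets items constrained_ids totals) := by unfold Pre_compute_balanced_targets; infer_instance

def pvWitness_compute_balanced_targets : (List (String × Int)) × List String × List Int :=
  ([("a", 0), ("b", 0), ("c", 1)], ["c"], [1, 1, 1, 0])

def Spec_compute_balanced_targets (items : List (String × Int)) (constrained_ids : List String) (totals : List Int) (out : List (String × Int)) : Prop := out = compute_balanced_targets_alt items constrained_ids totals
instance (items : List (String × Int)) (constrained_ids : List String) (totals : List Int) (out : List (String × Int)) : Decidable (Spec_compute_balanced_targets items constrained_ids totals out) := by unfold Spec_compute_balanced_targets; infer_instance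

-- ===== CLAIM (what is proved, stated in full; the proofs are below) =====
def Claim_equal_compute_balanced_targets : Prop := ∀ (items : List (String × Int)) (constrained_ids : List String) (totals : List Int), Dom_compute_balanced_targets items constrained_ids totals → Pre_compute_balanced_targets items constrained_ids totals → Spec_compute_balanced_targets items constrained_ids totals (compute_balanced_targets items constrained_ids totals)

-- ===== LEMMAS AND PROOFS =====

-- counting loop over positions in 0..3 counts each bucket
theorem pv_cu_fold (l : List (String × Int)) (h : ∀ p ∈ l, 0 ≤ p.2 ∧ p.2 < 4) :
    ∀ a b c d : Int,
      l.foldl (fun cu p => pvBump cu p.2) [a, b, c, d] =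
        [a + (l.countP (fun p => p.2 == 0) : Int), b + (l.countP (fun p => p.2 == 1) : Int),
         c + (l.countP (fun p => p.2 == 2) : Int), d + (l.countP (fun p => p.2 == 3) : Int)] := by
  induction l with
  | nil => intro a b c d; simp
  | cons hd tl ih =>
    intro a b c d
    obtain ⟨h0, h4⟩ := h hd (by simp)
    have htl : ∀ p ∈ tl, 0 ≤ p.2 ∧ p.2 < 4 := fun p hp => h p (by simp [hp])
    have hc : hd.2 = 0 ∨ hd.2 = 1 ∨ hd.2 = 2 ∨ hd.2 = 3 := by omega
    rcases hc with hc | hc | hc | hc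
    · rw [List.foldl_cons, show pvBump [a, b, c, d] hd.2 = [a + 1, b, c, d] from by
        rw [hc]; rfl, ih htl]
      simp [hc]
      all_goals omega
    · rw [List.foldl_cons, show pvBump [a, b, c, d] hd.2 = [a, b + 1, c, d] from by
        rw [hc]; rfl, ih htl]
      simp [hc]
      all_goals omega
    · rw [List.foldl_cons, show pvBump [a, b, c, d] hd.2 = [a, b, c + 1, d] from by
        rw [hc]; rfl, ih htl]
      simp [hc]
      all_goals omega
    · rw [List.foldl_cons, show pvBump [a, b, c, d] hd.2 = [a, b, c, d + 1] from by
        rw [hc]; rfl, ih htl]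
      simp [hc]
      all_goals omega

theorem pv_initByPos_getD (c : Int) : pvInitByPos.getD c [] = [] := by
  simp [pvInitByPos, PySem.Dict.getD_insert]

-- the by_pos dict groups unconstrained kbids by position
theorem pv_bucket_char (l : List (String × Int)) (c : Int) :
    (l.foldl (fun d p => d.modify p.2 [] (fun v => v ++ [p.1])) pvInitByPos).getD c []
      = (l.filter (fun p => p.2 == c)).map (fun p => p.1) := by
  have hmap : l.foldl (fun d p => d.modify p.2 [] (fun v => v ++ [p.1])) pvInitByPos
      = ((l.map (fun p => (p.2, p.1))).foldl
          (fun d q => d.modify q.1 [] (fun v => v ++ [q.2])) pvInitByPos) := by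
    rw [List.foldl_map]
  rw [hmap, PySem.Dict.getD_foldl_modify_append, pv_initByPos_getD, List.filter_map,
    List.map_map]
  simp [Function.comp_def]

-- insertBy commutes with map when keys correspond
theorem pv_insertBy_map {α β : Type} (f : α → β) (k : β → Int) (x : α) (ys : List α) :
    PySem.List.insertBy (fun a b => decide (k a < k b)) (f x) (ys.map f)
      = (PySem.List.insertBy (fun a b => decide (k (f a) < k (f b))) x ys).map f := by
  induction ys with
  | nil => simp [PySem.List.insertBy]
  | cons hd tl ih =>
    simp only [List.map_cons, PySem.List.insertBy]
    split_ifs <;> simp_all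

-- Python's stable sort of a mapped list is the mapped stable sort with the composed key
theorem pv_sorted_map {α β : Type} (f : α → β) (k : β → Int) (l : List α) :
    PySem.List.sorted (l.map f) k = (PySem.List.sorted l (fun a => k (f a))).map f := by
  rw [PySem.List.sorted_eq_foldl_insertBy, PySem.List.sorted_eq_foldl_insertBy, List.foldl_map]
  suffices hgen : ∀ (acc : List α),
      l.foldl (fun acc x => PySem.List.insertBy (fun a b => decide (k a < k b)) (f x) acc)
        (acc.map f)
      = (l.foldl (fun acc x =>
          PySem.List.insertBy (fun a b => decide (k (f a) < k (f b))) x acc) acc).map f by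
    simpa using hgen []
  induction l with
  | nil => intro acc; simp
  | cons hd tl ih =>
    intro acc
    rw [List.foldl_cons, List.foldl_cons, pv_insertBy_map f k hd acc, ih]

-- the queue of deficit slots a deficit list still offers
def pvFlatten (d : List (Int × Int)) : List Int :=
  d.flatMap (fun s => List.replicate s.2.toNat s.1)

theorem pv_inner_none (d : List (Int × Int)) (h : pvFlatten d = []) : pvInnerA d = none := by
  induction d with
  | nil => rfl
  | cons hd tl ih =>
    obtain ⟨p, c⟩ := hd
    simp only [pvFlatten, List.flatMap_cons, List.append_eq_nil_iff,
      List.replicate_eq_nil_iff] at h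
    have hc : ¬ 0 < c := by omega
    simp [pvInnerA, hc, ih (by simpa [pvFlatten] using h.2)]

theorem pv_inner_some (d : List (Int × Int)) (q : Int) (rest : List Int)
    (h : pvFlatten d = q :: rest) :
    ∃ d', pvInnerA d = some (q, d') ∧ pvFlatten d' = rest := by
  induction d with
  | nil => simp [pvFlatten] at h
  | cons hd tl ih =>
    obtain ⟨p, c⟩ := hd
    by_cases hc : 0 < c
    · have hrep : List.replicate c.toNat p = p :: List.replicate (c - 1).toNat p := by
        have hn : c.toNat = (c - 1).toNat + 1 := by omega
        rw [hn, List.replicate_succ]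
      simp only [pvFlatten, List.flatMap_cons, hrep, List.cons_append, List.cons.injEq] at h
      refine ⟨(p, c - 1) :: tl, ?_, ?_⟩
      · simp [pvInnerA, hc, h.1]
      · simp [pvFlatten, List.flatMap_cons, ← h.2]
    · have hrep : List.replicate c.toNat p = ([] : List Int) := by
        have hn : c.toNat = 0 := by omega
        simp [hn]
      simp only [pvFlatten, List.flatMap_cons, hrep, List.nil_append] at h
      obtain ⟨t', ht1, ht2⟩ := ih (by simpa [pvFlatten] using h)
      refine ⟨(p, c) :: t', by simp [pvInnerA, hc, ht1], ?_⟩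
      simpa [pvFlatten, hrep] using ht2

-- A's greedy assignment over a kbid queue is the zip with the flattened deficit queue
theorem pv_loop_spec (ks : List String) :
    ∀ (d : List (Int × Int)) (m : PySem.Dict String Int),
      (ks.foldl pvAssignA (m, d)).1
        = (ks.zip (pvFlatten d)).foldl (fun mm p => mm.insert p.1 p.2) m := by
  induction ks with
  | nil => intro d m; rfl
  | cons k ks ih =>
    intro d m
    cases h : pvFlatten d with
    | nil =>
      have hnone := pv_inner_none d h
      simp [List.foldl_cons, pvAssignA, hnone, ih d m, h]
    | cons q rest =>
      obtain ⟨d', hd1, hd2⟩ := pv_inner_some d q rest h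
      simp [List.foldl_cons, pvAssignA, hd1, ih d' (m.insert k q), hd2]

-- the deltas lists of A (via target_uncon) and B (direct) coincide
theorem pv_deltas_eq (ts cd cnt : List Int) :
    (PySem.List.pyRange 0 4 1).map (fun i =>
        PySem.List.pyGetD ((PySem.List.pyRange 0 4 1).map
          (fun j => PySem.List.pyGetD ts j 0 - PySem.List.pyGetD cd j 0)) i 0
          - PySem.List.pyGetD cnt i 0)
      = (PySem.List.pyRange 0 4 1).map (fun i =>
        PySem.List.pyGetD ts i 0 - PySem.List.pyGetD cd i 0 - PySem.List.pyGetD cnt i 0) := by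
  apply List.map_congr_left
  intro i hi
  obtain ⟨h0, h4⟩ := PySem.List.mem_pyRange_one.mp hi
  rw [PySem.List.pyGetD_map_pyRange_of_nonneg _ _ _ _ h0 h4]

-- A's whole moves loop, flattened: fold pvAssignA over the concatenated slices
theorem pv_tailA (bp : PySem.Dict Int (List String)) (surplus deficit : List (Int × Int)) :
    (surplus.foldl (fun st sp =>
        (PySem.List.slice (bp.getD sp.1 []) none (some sp.2)).foldl pvAssignA st)
      (PySem.Dict.empty, deficit)).1
    = (((surplus.flatMap (fun sp => PySem.List.slice (bp.getD sp.1 []) none (some sp.2))).zip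
        (pvFlatten deficit)).foldl (fun d q => d.insert q.1 q.2) PySem.Dict.empty) := by
  rw [← List.foldl_flatMap, pv_loop_spec]

-- pointwise-equal flatMap functions give equal flatMaps
theorem pv_flatMap_congr {α β : Type} (l : List α) (f g : α → List β)
    (h : ∀ x ∈ l, f x = g x) : l.flatMap f = l.flatMap g := by
  induction l with
  | nil => rfl
  | cons hd tl ih =>
    simp only [List.flatMap_cons, h hd (by simp), ih (fun x hx => h x (by simp [hx]))]

-- filter-of-filter with the conjunction in B's order
theorem pv_bucket_items (cids : List String) (items : List (String × Int)) (i : Int) :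
    (items.filter (fun p => !cids.contains p.1)).filter (fun q => q.2 == i)
      = items.filter (fun q => q.2 == i && !cids.contains q.1) := by
  rw [List.filter_filter]

-- B's bounds loop: cumulative ends as a recursive spec
def pvBSpec (δ : Int → Int) (a0 : Int) : List Int → List (Int × Int)
  | [] => []
  | i :: t => (a0 + δ i, i) :: pvBSpec δ (a0 + δ i) t

theorem pv_bspec_fold (δ : Int → Int) (l : List Int) :
    ∀ (a0 : Int) (bs0 : List (Int × Int)),
      l.foldl (fun s i => (s.1 + δ i, s.2 ++ [(s.1 + δ i, i)])) (a0, bs0)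
        = (a0 + (l.map δ).sum, bs0 ++ pvBSpec δ a0 l) := by
  induction l with
  | nil => intro a0 bs0; simp [pvBSpec]
  | cons hd tl ih =>
    intro a0 bs0
    rw [List.foldl_cons, ih]
    simp [pvBSpec, add_assoc]

theorem pv_flat_len (δ : Int → Int) (l : List Int) (h : ∀ i ∈ l, 0 < δ i) :
    ((l.flatMap (fun i => List.replicate (δ i).toNat i)).length : Int) = (l.map δ).sum := by
  induction l with
  | nil => simp
  | cons hd tl ih =>
    have hhd := h hd (by simp)
    have := ih (fun i hi => h i (by simp [hi]))
    simp only [List.flatMap_cons, List.length_append, List.length_replicate, List.map_cons,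
      List.sum_cons]
    push_cast
    omega

-- the boundary lookup finds the rank-th slot of the flattened deficit queue
theorem pv_target_spec (δ : Int → Int) (l : List Int) :
    ∀ (a0 r : Int), (∀ i ∈ l, 0 < δ i) → a0 ≤ r → r < a0 + (l.map δ).sum →
      pvTargetFor (pvBSpec δ a0 l) r
        = some ((l.flatMap (fun i => List.replicate (δ i).toNat i)).getD (r - a0).toNat 0) := by
  induction l with
  | nil => intro a0 r _ h1 h2; simp at h2; omega
  | cons hd tl ih =>
    intro a0 r hpos h1 h2
    have hhd : 0 < δ hd := hpos hd (by simp)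
    have htl : ∀ i ∈ tl, 0 < δ i := fun i hi => hpos i (by simp [hi])
    have hsum : r < a0 + δ hd + (tl.map δ).sum := by
      simp only [List.map_cons, List.sum_cons] at h2; omega
    simp only [pvBSpec, pvTargetFor, List.flatMap_cons]
    by_cases hr : r < a0 + δ hd
    · rw [if_pos hr]
      have hidx : (r - a0).toNat < (List.replicate (δ hd).toNat hd).length := by
        rw [List.length_replicate]; omega
      rw [List.getD_eq_getElem?_getD, List.getElem?_append_left hidx]
      have hget : (List.replicate (δ hd).toNat hd)[(r - a0).toNat]'hidx = hd :=
        List.getElem_replicate _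
      rw [List.getElem?_eq_getElem hidx, hget]
      rfl
    · rw [if_neg hr]
      rw [ih (a0 + δ hd) r htl (by omega) (by omega)]
      have hlen : (List.replicate (δ hd).toNat hd).length ≤ (r - a0).toNat := by
        rw [List.length_replicate]; omega
      have harg : (r - a0).toNat - (List.replicate (δ hd).toNat hd).length
          = (r - (a0 + δ hd)).toNat := by
        rw [List.length_replicate]; omega
      rw [List.getD_eq_getElem?_getD, List.getD_eq_getElem?_getD,
        List.getElem?_append_right hlen, harg]

-- proof-only step function: what one candidate does to (moves, rank)
def pvStep (bounds : List (Int × Int)) (acc : Int)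
    (s : PySem.Dict String Int × Int) (k : String) : PySem.Dict String Int × Int :=
  if s.2 < acc then
    match pvTargetFor bounds s.2 with
    | some q => (s.1.insert k q, s.2 + 1)
    | none => s
  else s

-- B's inner scan = fold of pvStep over the first 'rem' candidates of position p
theorem pv_scan_spec (cids : List String) (bounds : List (Int × Int)) (acc p : Int)
    (its : List (String × Int)) :
    ∀ (rem rank : Int) (m : PySem.Dict String Int), 0 ≤ rem →
      pvScanB cids bounds acc p its rem rank m
        = (((its.filter (fun q => q.2 == p && !cids.contains q.1)).map Prod.fst).take
            rem.toNat).foldl (pvStep bounds acc) (m, rank) := by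
  induction its with
  | nil => intro rem rank m _; simp [pvScanB]
  | cons it t ih =>
    intro rem rank m hrem
    by_cases h0 : rem = 0
    · simp [pvScanB, h0]
    · have hbe : (rem == 0) = false := by simp [h0]
      by_cases hc : (it.2 == p && !cids.contains it.1) = true
      · have htn : rem.toNat = (rem - 1).toNat + 1 := by omega
        rw [htn]
        simp only [List.filter_cons, hc, if_true, List.map_cons, List.take_succ_cons,
          List.foldl_cons]
        simp only [pvScanB, hbe, hc, if_true, Bool.false_eq_true, if_false]
        by_cases hlt : rank < acc
        · rw [if_pos hlt]
          cases htar : pvTargetFor bounds rank with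
          | some q =>
            simp [pvStep, hlt, htar, ih (rem - 1) (rank + 1) (m.insert it.1 q) (by omega)]
          | none =>
            simp [pvStep, hlt, htar, ih (rem - 1) rank m (by omega)]
        · rw [if_neg hlt]
          simp [pvStep, hlt, ih (rem - 1) rank m (by omega)]
      · have hc' : (it.2 == p && !cids.contains it.1) = false := by simpa using hc
        simp only [List.filter_cons, hc', Bool.false_eq_true, if_false, pvScanB, hbe]
        exact ih rem rank m hrem

-- folding pvStep along a key list = folding plain inserts along the zip with the slot queue
theorem pv_zipfold (bounds : List (Int × Int)) (F : List Int)
    (htar : ∀ r : Int, 0 ≤ r → r < (F.length : Int) →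
      pvTargetFor bounds r = some (F.getD r.toNat 0)) :
    ∀ (ks : List String) (m : PySem.Dict String Int) (rank : Int), 0 ≤ rank →
      (ks.foldl (pvStep bounds (F.length : Int)) (m, rank)).1
        = (ks.zip (F.drop rank.toNat)).foldl (fun d q => d.insert q.1 q.2) m := by
  intro ks
  induction ks with
  | nil => intro m rank _; simp
  | cons k ks ih =>
    intro m rank hrank
    by_cases hlt : rank < (F.length : Int)
    · have hidx : rank.toNat < F.length := by omega
      have hq := htar rank hrank hlt
      have hdrop : F.drop rank.toNat = F[rank.toNat] :: F.drop (rank.toNat + 1) :=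
        List.drop_eq_getElem_cons hidx
      have htn : (rank + 1).toNat = rank.toNat + 1 := by omega
      rw [List.foldl_cons, show pvStep bounds (F.length : Int) (m, rank) k
          = (m.insert k F[rank.toNat], rank + 1) from by
            simp [pvStep, hlt, hq, List.getElem?_eq_getElem hidx],
        ih _ (rank + 1) (by omega), htn, hdrop, List.zip_cons_cons, List.foldl_cons]
    · have hdrop : F.drop rank.toNat = [] := List.drop_eq_nil_of_le (by omega)
      rw [List.foldl_cons, show pvStep bounds (F.length : Int) (m, rank) k = (m, rank) from by
        simp [pvStep, hlt], ih m rank hrank, hdrop]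
      simp

-- A's first loop keeps the unconstrained items in order
theorem pv_app_fold (cids : List String) (l : List (String × Int)) :
    ∀ (acc : List (String × Int)),
      l.foldl (fun y p => if cids.contains p.1 then y else y ++ [p]) acc
        = acc ++ l.filter (fun p => !cids.contains p.1) := by
  induction l with
  | nil => intro acc; simp
  | cons hd tl ih =>
    intro acc
    rw [List.foldl_cons, List.filter_cons]
    by_cases h : cids.contains hd.1
    · rw [if_pos h, ih]
      have h' : hd.1 ∈ cids := by simpa using h
      simp [h']
    · rw [if_neg h, ih]
      have h' : hd.1 ∉ cids := by simpa using h
      simp [h']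

-- B's counting of the unconstrained items is a fold over the filtered list
theorem pv_skip_fold (cids : List String) (l : List (String × Int)) :
    ∀ (acc : List Int),
      l.foldl (fun y p => if cids.contains p.1 then y else pvBump y p.2) acc
        = (l.filter (fun p => !cids.contains p.1)).foldl (fun y p => pvBump y p.2) acc := by
  induction l with
  | nil => intro acc; simp
  | cons hd tl ih =>
    intro acc
    rw [List.foldl_cons, List.filter_cons]
    by_cases h : cids.contains hd.1
    · rw [if_pos h, ih]
      have h' : hd.1 ∈ cids := by simpa using h
      simp [h']
    · rw [if_neg h, ih]
      have h' : hd.1 ∉ cids := by simpa using h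
      simp [h']

-- fold functions that agree on the list's members give equal folds
theorem pv_foldl_congr_mem {α β : Type} (l : List α) (f g : β → α → β) (init : β)
    (h : ∀ (acc : β) (x : α), x ∈ l → f acc x = g acc x) : l.foldl f init = l.foldl g init := by
  induction l generalizing init with
  | nil => rfl
  | cons hd tl ih =>
    rw [List.foldl_cons, List.foldl_cons, h init hd (by simp)]
    exact ih _ (fun acc x hx => h acc x (by simp [hx]))

-- with the same deltas/counts data, A's greedy loop and B's rank-scanning loop agree
theorem pv_tails_eq (cids : List String) (items : List (String × Int))
    (bp : PySem.Dict Int (List String)) (CNT D : List Int)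
    (hbp : ∀ i : Int, bp.getD i []
      = (items.filter (fun q => q.2 == i && !cids.contains q.1)).map Prod.fst) :
    ((((PySem.List.pyRange 0 4 1).filter
        (fun i => decide (PySem.List.pyGetD D i 0 < 0))).map
        (fun i => (i, -PySem.List.pyGetD D i 0))).foldl
      (fun st sp => (PySem.List.slice (bp.getD sp.1 []) none (some sp.2)).foldl pvAssignA st)
      (PySem.Dict.empty, PySem.List.sorted
        (((PySem.List.pyRange 0 4 1).filter
          (fun i => decide (0 < PySem.List.pyGetD D i 0))).map
          (fun i => (i, PySem.List.pyGetD D i 0)))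
        (fun d => PySem.List.pyGetD CNT d.1 0))).1.items
    = (((PySem.List.pyRange 0 4 1).filter
        (fun p => decide (PySem.List.pyGetD D p 0 < 0))).foldl
        (fun st p => pvScanB cids
          ((PySem.List.sorted ((PySem.List.pyRange 0 4 1).filter
              (fun i => decide (0 < PySem.List.pyGetD D i 0)))
            (fun i => PySem.List.pyGetD CNT i 0)).foldl
            (fun s i => (s.1 + PySem.List.pyGetD D i 0,
              s.2 ++ [(s.1 + PySem.List.pyGetD D i 0, i)])) ((0 : Int), ([] : List (Int × Int)))).2
          ((PySem.List.sorted ((PySem.List.pyRange 0 4 1).filter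
              (fun i => decide (0 < PySem.List.pyGetD D i 0)))
            (fun i => PySem.List.pyGetD CNT i 0)).foldl
            (fun s i => (s.1 + PySem.List.pyGetD D i 0,
              s.2 ++ [(s.1 + PySem.List.pyGetD D i 0, i)])) ((0 : Int), ([] : List (Int × Int)))).1
          p items (-PySem.List.pyGetD D p 0) st.2 st.1)
        (PySem.Dict.empty, (0 : Int))).1.items := by
  apply congrArg PySem.Dict.items
  have hps : ∀ p ∈ (PySem.List.pyRange 0 4 1).filter
      (fun i => decide (PySem.List.pyGetD D i 0 < 0)), PySem.List.pyGetD D p 0 < 0 :=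
    fun p hp => by simpa using (List.mem_filter.mp hp).2
  set order := PySem.List.sorted ((PySem.List.pyRange 0 4 1).filter
      (fun i => decide (0 < PySem.List.pyGetD D i 0))) (fun i => PySem.List.pyGetD CNT i 0)
    with horder
  have hpos : ∀ i ∈ order, 0 < PySem.List.pyGetD D i 0 := by
    intro i hi
    rw [horder] at hi
    have := (PySem.List.mem_sorted _ _ _ _).mp hi
    simpa using (List.mem_filter.mp this).2
  -- shared flattened queues
  set F := order.flatMap (fun i => List.replicate (PySem.List.pyGetD D i 0).toNat i) with hF
  set S := ((PySem.List.pyRange 0 4 1).filter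
      (fun i => decide (PySem.List.pyGetD D i 0 < 0))).flatMap
      (fun i => ((items.filter (fun q => q.2 == i && !cids.contains q.1)).map Prod.fst).take
        (-PySem.List.pyGetD D i 0).toNat) with hS
  -- ===== A side =====
  rw [pv_tailA, List.flatMap_map]
  have hSA : ((PySem.List.pyRange 0 4 1).filter
      (fun i => decide (PySem.List.pyGetD D i 0 < 0))).flatMap
      (fun a => PySem.List.slice (bp.getD (a, -PySem.List.pyGetD D a 0).1 []) none
        (some (a, -PySem.List.pyGetD D a 0).2)) = S := by
    rw [hS]
    apply pv_flatMap_congr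
    intro i hi
    have hneg := hps i hi
    show PySem.List.slice (bp.getD i []) none (some (-PySem.List.pyGetD D i 0)) = _
    rw [hbp i, PySem.List.slice_to _ (by omega)]
  rw [hSA]
  have hFA : pvFlatten (PySem.List.sorted
      (((PySem.List.pyRange 0 4 1).filter
        (fun i => decide (0 < PySem.List.pyGetD D i 0))).map
        (fun i => (i, PySem.List.pyGetD D i 0)))
      (fun d => PySem.List.pyGetD CNT d.1 0)) = F := by
    rw [pv_sorted_map (fun i => (i, PySem.List.pyGetD D i 0))
      (fun d => PySem.List.pyGetD CNT d.1 0)]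
    rw [show PySem.List.sorted ((PySem.List.pyRange 0 4 1).filter
        (fun i => decide (0 < PySem.List.pyGetD D i 0)))
        (fun a => PySem.List.pyGetD CNT (a, PySem.List.pyGetD D a 0).1 0) = order from rfl]
    rw [hF, pvFlatten, List.flatMap_map]
  rw [hFA]
  -- ===== B side =====
  simp only [pv_bspec_fold (fun i => PySem.List.pyGetD D i 0) order 0 [], List.nil_append,
    zero_add]
  have hacc : (order.map (fun i => PySem.List.pyGetD D i 0)).sum = (F.length : Int) := by
    rw [hF, pv_flat_len _ _ hpos]
  have htar : ∀ r : Int, 0 ≤ r → r < (F.length : Int) →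
      pvTargetFor (pvBSpec (fun i => PySem.List.pyGetD D i 0) 0 order) r
        = some (F.getD r.toNat 0) := by
    intro r h0 hr
    rw [pv_target_spec (fun i => PySem.List.pyGetD D i 0) order 0 r hpos h0
      (by rw [hacc]; omega), hF]
    rw [show r - 0 = r from by omega]
  have hscan : ∀ (st : PySem.Dict String Int × Int) (p : Int),
      p ∈ (PySem.List.pyRange 0 4 1).filter
        (fun i => decide (PySem.List.pyGetD D i 0 < 0)) →
      pvScanB cids (pvBSpec (fun i => PySem.List.pyGetD D i 0) 0 order)
          ((order.map (fun i => PySem.List.pyGetD D i 0)).sum) p items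
          (-PySem.List.pyGetD D p 0) st.2 st.1
        = (((items.filter (fun q => q.2 == p && !cids.contains q.1)).map Prod.fst).take
            (-PySem.List.pyGetD D p 0).toNat).foldl
            (pvStep (pvBSpec (fun i => PySem.List.pyGetD D i 0) 0 order)
              ((order.map (fun i => PySem.List.pyGetD D i 0)).sum)) st := by
    intro st p hp
    have hneg := hps p hp
    rw [pv_scan_spec cids _ _ p items (-PySem.List.pyGetD D p 0) st.2 st.1 (by omega)]
  rw [pv_foldl_congr_mem _ _ (fun st p =>
      (((items.filter (fun q => q.2 == p && !cids.contains q.1)).map Prod.fst).take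
        (-PySem.List.pyGetD D p 0).toNat).foldl
        (pvStep (pvBSpec (fun i => PySem.List.pyGetD D i 0) 0 order)
          ((order.map (fun i => PySem.List.pyGetD D i 0)).sum)) st) _ hscan,
    ← List.foldl_flatMap, ← hS, hacc,
    pv_zipfold (pvBSpec (fun i => PySem.List.pyGetD D i 0) 0 order) F htar S
      PySem.Dict.empty 0 (by omega)]
  simp

-- ===== VERDICT (by name: the statement is the Claim_ definition above) =====
theorem compute_balanced_targets_spec : Claim_equal_compute_balanced_targets := by
  intro items cids totals _hdom hpre
  obtain ⟨_hlen, hitems⟩ := hpre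
  unfold Spec_compute_balanced_targets
  simp only [compute_balanced_targets, compute_balanced_targets_alt]
  -- split A's and B's first loops into their two independent accumulators
  rw [show (fun (s : List Int × List (String × Int)) (p : String × Int) =>
        if cids.contains p.1 then (pvBump s.1 p.2, s.2) else (s.1, s.2 ++ [p]))
      = (fun s p =>
          (if cids.contains p.1 then pvBump s.1 p.2 else s.1,
           if cids.contains p.1 then s.2 else s.2 ++ [p])) from by
        funext s p
        by_cases h : cids.contains p.1 = true
        · rw [if_pos h, if_pos h, if_pos h]
        · rw [if_neg h, if_neg h, if_neg h],
    PySem.List.foldl_prod_mk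
      (f := fun x (p : String × Int) => if cids.contains p.1 then pvBump x p.2 else x)
      (g := fun y (p : String × Int) => if cids.contains p.1 then y else y ++ [p])]
  rw [show (fun (s : List Int × List Int) (p : String × Int) =>
        if cids.contains p.1 then (pvBump s.1 p.2, s.2) else (s.1, pvBump s.2 p.2))
      = (fun s p =>
          (if cids.contains p.1 then pvBump s.1 p.2 else s.1,
           if cids.contains p.1 then s.2 else pvBump s.2 p.2)) from by
        funext s p
        by_cases h : cids.contains p.1 = true
        · rw [if_pos h, if_pos h, if_pos h]
        · rw [if_neg h, if_neg h, if_neg h],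
    PySem.List.foldl_prod_mk
      (f := fun x (p : String × Int) => if cids.contains p.1 then pvBump x p.2 else x)
      (g := fun y (p : String × Int) => if cids.contains p.1 then y else pvBump y p.2)]
  simp only [pv_app_fold, pv_skip_fold, List.nil_append]
  set u := items.filter (fun p => !cids.contains p.1) with hu
  have hmem : ∀ p ∈ u, 0 ≤ p.2 ∧ p.2 < 4 := by
    intro p hp
    rw [hu] at hp
    simp only [List.mem_filter, Bool.not_eq_eq_eq_not, Bool.not_true] at hp
    rcases hitems p hp.1 with h | h
    · exact h
    · exact absurd h.1 (by simpa using hp.2)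
  rw [PySem.List.foldl_prod_mk (f := fun (cu : List Int) (p : String × Int) => pvBump cu p.2)
    (g := fun (d : PySem.Dict Int (List String)) (p : String × Int) =>
      d.modify p.2 [] (fun l => l ++ [p.1]))]
  have hcu := pv_cu_fold u hmem 0 0 0 0
  simp only [zero_add] at hcu
  rw [show (fun (y : List Int) (p : String × Int) => pvBump y p.2)
    = (fun (cu : List Int) (p : String × Int) => pvBump cu p.2) from rfl, hcu]
  simp only [pv_deltas_eq]
  exact pv_tails_eq cids items _ _ _ (fun i => by
    rw [pv_bucket_char u i, ← pv_bucket_items cids items i])
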